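-- pv_equiv track=rewrite | github.com/bogdanevropin/Euler_project_tasks | Euler_26.py | find_rep
-- ===== SOURCE A (Python) =====
-- def find_rep(s):
--     l = len(s)
--     size = 1
--     for start in range(0, l - size):
--         end = start + size
--         p0 = s[start:end]
--         for i in range(end, l - start):
--             p1 = s[i:i+len(p0)]
--             if p0 != p1:
--                 break
--         else:
--             return p0
--     return 'none'
--
--
--
--
--     return '0'
-- ===== SOURCE B (Python) =====
-- def find_rep(s):
--     l = len(s)
--     run = [1] * l
--     for i in range(l - 2, -1, -1):
--         run[i] = run[i + 1] + 1 if s[i] == s[i + 1] else 1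
--     for start in range(l - 1):
--         if run[start] >= l - 2 * start:
--             return s[start]
--     return 'none'
-- ===== Notes on version B (the rewrite author's own statement) =====
-- stated objective: faster
-- what changed: A re-scans each shrinking window character by character for every start; B precomputes the run length starting at each index in one right-to-left pass and then answers each start's constant-window test with a single O(1) comparison run[start] >= l - 2*start.
import Mathlib
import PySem

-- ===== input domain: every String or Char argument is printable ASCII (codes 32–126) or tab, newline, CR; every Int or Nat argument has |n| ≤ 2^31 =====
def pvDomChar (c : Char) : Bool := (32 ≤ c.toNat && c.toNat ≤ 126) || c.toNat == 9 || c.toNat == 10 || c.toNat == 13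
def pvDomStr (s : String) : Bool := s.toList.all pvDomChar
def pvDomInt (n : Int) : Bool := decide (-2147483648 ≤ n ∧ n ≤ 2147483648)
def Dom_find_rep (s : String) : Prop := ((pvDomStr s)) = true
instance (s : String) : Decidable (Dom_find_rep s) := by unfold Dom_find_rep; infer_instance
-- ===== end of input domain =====

-- B replaces A's quadratic rescan of each shrinking window by a right-to-left run-length
-- precomputation with an O(1) check per start (objective: faster).

-- ===== PORT A =====
-- inner 'for i in range(end, l - start)' loop: true = the loop ran to completion (for-else)
def innerA (cs p0 : List Char) : List Int → Bool
  | [] => true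
  | i :: rest =>
    let p1 := PySem.List.slice cs (some i) (some (i + (p0.length : Int)))
    if p0 ≠ p1 then false else innerA cs p0 rest

-- outer 'for start in range(0, l - size)' loop with early return
def outerA (cs : List Char) (l : Int) : List Int → String
  | [] => "none"
  | start :: rest =>
    let e := start + 1
    let p0 := PySem.List.slice cs (some start) (some e)
    if innerA cs p0 (PySem.List.pyRange e (l - start) 1) then String.ofList p0
    else outerA cs l rest

def find_rep (s : String) : String :=
  let cs := s.toList
  let l : Int := cs.length
  outerA cs l (PySem.List.pyRange 0 (l - 1) 1)

-- ===== PORT B =====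
-- run[i] = run[i+1] + 1 if s[i] == s[i+1] else 1, built right-to-left (Source B's backwards loop)
def runsB : List Char → List Int
  | [] => []
  | [_] => [1]
  | c :: d :: t =>
    let rs := runsB (d :: t)
    (if c = d then rs.headD 1 + 1 else 1) :: rs

-- 'for start in range(l - 1): if run[start] >= l - 2 * start: return s[start]'
def scanB (cs : List Char) (run : List Int) (l : Int) : List Int → String
  | [] => "none"
  | st :: rest =>
    if PySem.List.pyGetD run st 0 ≥ l - 2 * st then String.ofList [PySem.List.pyGetD cs st ' ']
    else scanB cs run l rest

def find_rep_alt (s : String) : String :=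
  let cs := s.toList
  let l : Int := cs.length
  scanB cs (runsB cs) l (PySem.List.pyRange 0 (l - 1) 1)

-- ===== PRECONDITION & SPEC =====
def Spec_find_rep (s : String) (out : String) : Prop := out = find_rep_alt s
instance (s : String) (out : String) : Decidable (Spec_find_rep s out) := by unfold Spec_find_rep; infer_instance

-- ===== CLAIM (what is proved, stated in full; the proofs are below) =====
def Claim_equal_find_rep : Prop := ∀ (s : String), Dom_find_rep s → Spec_find_rep s (find_rep s)

-- ===== LEMMAS AND PROOFS =====

-- spec of the run-length at the head of a nonempty list
def runLen : List Char → Nat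
  | [] => 0
  | [_] => 1
  | c :: d :: t => if c = d then runLen (d :: t) + 1 else 1

lemma runsB_cons (c : Char) (t : List Char) :
    runsB (c :: t) = (runLen (c :: t) : Int) :: runsB t := by
  induction t generalizing c with
  | nil => simp [runsB, runLen]
  | cons d t' ih => simp [runsB, runLen, ih d]

lemma runsB_getD (cs : List Char) (a : Nat) (ha : a < cs.length) :
    (runsB cs).getD a 0 = (runLen (cs.drop a) : Int) := by
  induction cs generalizing a with
  | nil => simp at ha
  | cons c t ih =>
    rw [runsB_cons]
    cases a with
    | zero => simp
    | succ a' =>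
      simp only [List.getD_cons_succ, List.drop_succ_cons]
      exact ih a' (by simpa using ha)

lemma runLen_ge_iff (c : Char) (t : List Char) (k : Nat) (hk : k ≤ t.length + 1) :
    (k ≤ runLen (c :: t)) ↔ (∀ j, j < k → (c :: t).getD j ' ' = c) := by
  induction t generalizing c k with
  | nil =>
    cases k with
    | zero => simp
    | succ k' =>
      have hk0 : k' = 0 := by simp at hk; omega
      subst hk0
      simp only [runLen]
      constructor
      · intro _ j hj
        have : j = 0 := by omega
        subst this
        rfl
      · intro _
        omega
  | cons d t' ih =>
    cases k with
    | zero => simp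
    | succ k' =>
      simp only [runLen]
      by_cases hcd : c = d
      · subst hcd
        rw [if_pos rfl]
        constructor
        · intro h j hj
          cases j with
          | zero => rfl
          | succ j' =>
            have := (ih c k' (by simpa using hk)).mp (by omega) j' (by omega)
            simpa using this
        · intro h
          have : k' ≤ runLen (c :: t') := by
            refine (ih c k' (by simpa using hk)).mpr ?_
            intro j hj
            have := h (j + 1) (by omega)
            simpa using this
          omega
      · rw [if_neg hcd]
        constructor
        · intro h j hj
          have : k' = 0 := by omega
          subst this
          interval_cases j
          rfl
        · intro h
          by_contra hlt
          have hk1 : 1 < k' + 1 := by omega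
          have := h 1 hk1
          simp at this
          exact hcd this.symm

lemma head_slice (cs : List Char) (a : Nat) (ha : a < cs.length) :
    PySem.List.slice cs (some (a : Int)) (some ((a : Int) + 1)) = [cs[a]] := by
  have h1 : ((a : Int) + 1) = (((a + 1 : Nat)) : Int) := by push_cast; ring
  rw [h1, PySem.List.slice_natCast]
  have h2 : a + 1 - a = 1 := by omega
  rw [h2, List.take_one, List.head?_drop]
  simp [List.getElem?_eq_getElem ha]

lemma innerA_singleton_iff (cs : List Char) (c : Char) (b e : Int) :
    innerA cs [c] (PySem.List.pyRange b e 1) = true ↔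
      (∀ i : Int, b ≤ i → i < e → PySem.List.slice cs (some i) (some (i + 1)) = [c]) := by
  by_cases h : e ≤ b
  · rw [PySem.List.pyRange_one_eq_nil h]
    simp only [innerA]
    constructor
    · intro _ i h1 h2; omega
    · intro _; trivial
  · push_neg at h
    have hn : (e - b).toNat ≠ 0 := by omega
    -- induction on the length of the range
    generalize hfuel : (e - b).toNat = n at *
    clear hn
    induction n generalizing b with
    | zero => omega
    | succ n ih =>
      rw [PySem.List.pyRange_one_cons h]
      simp only [innerA, List.length_singleton, Nat.cast_one]
      by_cases hb : PySem.List.slice cs (some b) (some (b + 1)) = [c]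
      · rw [if_neg (by simp [hb])]
        by_cases h2 : e ≤ b + 1
        · rw [PySem.List.pyRange_one_eq_nil h2]
          simp only [innerA]
          constructor
          · intro _ i h1i h2i
            have : i = b := by omega
            subst this; exact hb
          · intro _; trivial
        · push_neg at h2
          have hih := ih (b + 1) h2 (by omega)
          refine hih.trans ⟨?_, ?_⟩
          · intro hall i h1i h2i
            by_cases hib : i = b
            · subst hib; exact hb
            · exact hall i (by omega) h2i
          · intro hall i h1i h2i
            exact hall i (by omega) h2i
      · rw [if_pos (by simpa [eq_comm] using hb)]
        constructor
        · intro habs; exact absurd habs (by simp)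
        · intro hall
          exact absurd (hall b (le_refl b) (by omega)) hb

lemma getD_drop_eq (cs : List Char) (a j : Nat) (h : a + j < cs.length) :
    (cs.drop a).getD j ' ' = cs[a + j] := by
  have h1 : j < (cs.drop a).length := by simp; omega
  rw [List.getD_eq_getElem _ _ h1]
  simp

-- the head step: A's inner-loop success at 'start = a' coincides with B's run-length test
lemma cond_eq (cs : List Char) (a : Nat) (ha : (a : Int) < (cs.length : Int) - 1) :
    (innerA cs (PySem.List.slice cs (some (a : Int)) (some ((a : Int) + 1)))
        (PySem.List.pyRange ((a : Int) + 1) ((cs.length : Int) - (a : Int)) 1) = true)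
      ↔ PySem.List.pyGetD (runsB cs) (a : Int) 0 ≥ (cs.length : Int) - 2 * (a : Int) := by
  have hal : a < cs.length := by omega
  rw [head_slice cs a hal]
  rw [PySem.List.pyGetD_natCast, runsB_getD cs a hal]
  rw [innerA_singleton_iff]
  -- rewrite runLen side
  obtain ⟨c, t, hct⟩ : ∃ c t, cs.drop a = c :: t := by
    cases hdrop : cs.drop a with
    | nil => exfalso; have := congrArg List.length hdrop; simp at this; omega
    | cons c t => exact ⟨c, t, rfl⟩
  have hc : c = cs[a] := by
    have := getD_drop_eq cs a 0 (by omega)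
    rw [hct] at this; simpa using this
  by_cases hbig : (cs.length : Int) - 2 * (a : Int) ≤ 1
  · -- window [a+1, l-a) is empty and the run test is trivially true
    constructor
    · intro _
      rw [hct]
      have h1 : 1 ≤ runLen (c :: t) := by
        cases t <;> simp [runLen] <;> split <;> omega
      omega
    · intro _ i h1 h2; omega
  · push_neg at hbig
    set k : Nat := (((cs.length : Int) - 2 * (a : Int))).toNat with hkdef
    have hk2 : 2 ≤ k := by omega
    have hkcast : ((k : Int)) = (cs.length : Int) - 2 * (a : Int) := by omega
    have hklen : k ≤ t.length + 1 := by
      have := congrArg List.length hct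
      simp at this
      omega
    rw [hct]
    rw [show ((runLen (c :: t) : Int) ≥ (cs.length : Int) - 2 * (a : Int)) ↔ (k ≤ runLen (c :: t)) by omega]
    rw [runLen_ge_iff c t k hklen]
    constructor
    · intro hall j hj
      by_cases hj0 : j = 0
      · subst hj0; simp [hc]
      · have hj1 : 1 ≤ j := by omega
        have hrange1 : (a : Int) + 1 ≤ ((a + j : Nat) : Int) := by push_cast; omega
        have hrange2 : ((a + j : Nat) : Int) < (cs.length : Int) - (a : Int) := by push_cast; omega
        have := hall ((a + j : Nat) : Int) hrange1 hrange2
        rw [head_slice cs (a + j) (by omega)] at this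
        have heq : cs[a + j] = c := by
          rw [hc]
          simpa using this
        rw [← hct]
        rw [getD_drop_eq cs a j (by omega)]
        exact heq
    · intro hall i h1 h2
      have hi0 : 0 ≤ i := by omega
      set j : Nat := (i - (a : Int)).toNat with hjdef
      have hij : (i : Int) = ((a + j : Nat) : Int) := by push_cast; omega
      have hjk : j < k := by omega
      have := hall j hjk
      rw [← hct, getD_drop_eq cs a j (by omega)] at this
      rw [hij, head_slice cs (a + j) (by omega)]
      rw [this, hc]

-- master loop correspondence
lemma loops_eq (cs : List Char) (n : Nat) : ∀ a : Nat, cs.length ≤ a + n →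
    outerA cs (cs.length : Int) (PySem.List.pyRange (a : Int) ((cs.length : Int) - 1) 1)
      = scanB cs (runsB cs) (cs.length : Int) (PySem.List.pyRange (a : Int) ((cs.length : Int) - 1) 1) := by
  induction n with
  | zero =>
    intro a ha
    rw [PySem.List.pyRange_one_eq_nil (by omega)]
    rfl
  | succ n ih =>
    intro a ha
    by_cases hend : (cs.length : Int) - 1 ≤ (a : Int)
    · rw [PySem.List.pyRange_one_eq_nil hend]
      rfl
    · push_neg at hend
      rw [PySem.List.pyRange_one_cons hend]
      simp only [outerA, scanB]
      rw [head_slice cs a (by omega)]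
      by_cases hcond : innerA cs [cs[a]] (PySem.List.pyRange ((a : Int) + 1) ((cs.length : Int) - (a : Int)) 1) = true
      · have hB : PySem.List.pyGetD (runsB cs) (a : Int) 0 ≥ (cs.length : Int) - 2 * (a : Int) := by
          rw [← cond_eq cs a hend]
          rw [head_slice cs a (by omega)]
          exact hcond
        rw [if_pos hcond, if_pos hB]
        have : PySem.List.pyGetD cs (a : Int) ' ' = cs[a] := by
          rw [PySem.List.pyGetD_natCast, List.getD_eq_getElem _ _ (by omega)]
        rw [this]
      · have hB : ¬ PySem.List.pyGetD (runsB cs) (a : Int) 0 ≥ (cs.length : Int) - 2 * (a : Int) := by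
          rw [← cond_eq cs a hend]
          rw [head_slice cs a (by omega)]
          exact hcond
        rw [if_neg hcond, if_neg hB]
        have hcast : (a : Int) + 1 = ((a + 1 : Nat) : Int) := by push_cast; ring
        rw [hcast]
        exact ih (a + 1) (by omega)

-- ===== VERDICT (by name: the statement is the Claim_ definition above) =====
theorem find_rep_spec : Claim_equal_find_rep := by
  intro s _
  unfold Spec_find_rep find_rep find_rep_alt
  have := loops_eq s.toList s.toList.length 0 (by omega)
  simpa using this
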